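-- pv_equiv track=rewrite | github.com/hsuanchl/MachineLearning | 4_Logistic_Regression/code/feature.py | model1
-- ===== SOURCE A (Python) =====
-- from collections import OrderedDict
--
-- def model1(dictionary,data):
--     formatted_words = []
--     for line in data:
--         formatted_words_line = []
--         words = line[1]
--         for word in words:
--             if word in dictionary:
--                 formatted_words_line.append(dictionary[word])
--         formatted_words_line = list(OrderedDict.fromkeys(formatted_words_line))               #remove duplicates while keeping order
--         formatted_words.append(formatted_words_line)
--     return formatted_words
-- ===== SOURCE B (Python) =====
-- def model1(dictionary, data):
--     result = []
--     for line in data: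
--         first = {}
--         for pos, word in enumerate(line[1]):
--             if word in dictionary:
--                 first.setdefault(dictionary[word], pos)
--         result.append([idx for idx, _ in sorted(first.items(), key=lambda kv: kv[1])])
--     return result
-- ===== Notes on version B (the rewrite author's own statement) =====
-- stated objective: alternative
-- what changed: B builds, per line, a first-occurrence-position index (mapped index -> earliest word position via setdefault) and then recovers the output by sorting the index's items by that position and projecting the keys, instead of A's append-all-matches list followed by an OrderedDict.fromkeys dedup pass.
import Mathlib
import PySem

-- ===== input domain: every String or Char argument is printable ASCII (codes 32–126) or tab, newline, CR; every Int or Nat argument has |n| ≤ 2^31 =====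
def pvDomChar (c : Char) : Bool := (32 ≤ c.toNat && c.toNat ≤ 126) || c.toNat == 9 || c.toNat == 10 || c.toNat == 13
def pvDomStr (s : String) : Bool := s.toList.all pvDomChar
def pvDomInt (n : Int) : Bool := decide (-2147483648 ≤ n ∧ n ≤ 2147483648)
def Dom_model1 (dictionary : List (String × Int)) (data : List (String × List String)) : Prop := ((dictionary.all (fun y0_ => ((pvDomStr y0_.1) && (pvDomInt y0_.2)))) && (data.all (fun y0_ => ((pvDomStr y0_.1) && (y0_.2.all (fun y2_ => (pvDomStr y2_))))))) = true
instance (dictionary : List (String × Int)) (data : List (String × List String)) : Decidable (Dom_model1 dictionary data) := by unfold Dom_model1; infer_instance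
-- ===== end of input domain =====

-- B replaces A's map-then-dedup per line by a first-occurrence-position index sorted by position; same return value (alternative decomposition, not faster).

-- ===== PORT A =====
def model1 (dictionary : List (String × Int)) (data : List (String × List String)) : List (List Int) :=
  data.foldl (fun formatted_words line =>
    let words := line.2
    let formatted_words_line :=
      words.foldl (fun acc word =>
        match PySem.Dict.get? (PySem.Dict.mk dictionary) word with
        | some v => acc ++ [v]
        | none => acc) []
    formatted_words ++ [PySem.List.dedup formatted_words_line]) []

-- ===== PORT B =====
def model1_alt (dictionary : List (String × Int)) (data : List (String × List String)) : List (List Int) :=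
  data.foldl (fun result line =>
    let first :=
      (PySem.List.enumerate line.2 0).foldl (fun (d : PySem.Dict Int Int) pw =>
        match PySem.Dict.get? (PySem.Dict.mk dictionary) pw.2 with
        | some idx => d.setdefault idx pw.1
        | none => d) PySem.Dict.empty
    result ++ [(PySem.List.sorted first.items (fun kv => kv.2) false).map (·.1)]) []

-- ===== PRECONDITION & SPEC =====
def Spec_model1 (dictionary : List (String × Int)) (data : List (String × List String)) (out : List (List Int)) : Prop := out = model1_alt dictionary data
instance (dictionary : List (String × Int)) (data : List (String × List String)) (out : List (List Int)) : Decidable (Spec_model1 dictionary data out) := by unfold Spec_model1; infer_instance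

-- ===== CLAIM (what is proved, stated in full; the proofs are below) =====
def Claim_equal_model1 : Prop := ∀ (dictionary : List (String × Int)) (data : List (String × List String)), Dom_model1 dictionary data → Spec_model1 dictionary data (model1 dictionary data)

-- ===== LEMMAS AND PROOFS =====

-- B's per-word step on the first-occurrence dict.
def pvStepB (dictionary : List (String × Int)) (d : PySem.Dict Int Int) (pw : Int × String) : PySem.Dict Int Int :=
  match PySem.Dict.get? (PySem.Dict.mk dictionary) pw.2 with
  | some idx => d.setdefault idx pw.1
  | none => d

-- Stored positions stay strictly increasing through B's per-line loop, and below the running counter.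
theorem pvB_items_pairwise (dictionary : List (String × Int)) (ws : List String) (s : Int) (d : PySem.Dict Int Int)
    (hlt : ∀ kv ∈ d.items, kv.2 < s) (hpw : d.items.Pairwise (fun a b => a.2 < b.2)) :
    ((PySem.List.enumerate ws s).foldl (pvStepB dictionary) d).items.Pairwise (fun a b => a.2 < b.2) ∧
    ∀ kv ∈ ((PySem.List.enumerate ws s).foldl (pvStepB dictionary) d).items, kv.2 < s + ws.length := by
  induction ws generalizing s d with
  | nil => exact ⟨hpw, by simpa [PySem.List.enumerate] using hlt⟩
  | cons w ws ih =>
    rw [PySem.List.enumerate_cons, List.foldl_cons]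
    have key : ((pvStepB dictionary d (s, w)).items.Pairwise (fun a b => a.2 < b.2)) ∧
        (∀ kv ∈ (pvStepB dictionary d (s, w)).items, kv.2 < s + 1) := by
      unfold pvStepB
      cases PySem.Dict.get? (PySem.Dict.mk dictionary) w with
      | none => exact ⟨hpw, fun kv h => by have := hlt kv h; omega⟩
      | some idx =>
        dsimp only
        by_cases hc : (d.contains idx) = true
        · rw [PySem.Dict.setdefault_of_contains d _ hc]
          exact ⟨hpw, fun kv h => by have := hlt kv h; omega⟩
        · rw [PySem.Dict.setdefault_of_not_contains d _ (by simpa using hc),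
              PySem.Dict.items_insert_of_not_contains d _ (by simpa using hc)]
          constructor
          · refine List.pairwise_append.mpr ⟨hpw, by simp, ?_⟩
            intro a ha b hb
            simp at hb
            subst hb
            exact hlt a ha
          · intro kv h
            rcases List.mem_append.mp h with h | h
            · have := hlt kv h; omega
            · simp at h; subst h; omega
    have := ih (s + 1) (pvStepB dictionary d (s, w)) key.2 key.1
    refine ⟨this.1, fun kv h => ?_⟩
    have := this.2 kv h
    simp only [List.length_cons]
    omega

-- The keys accumulated by B's setdefault loop follow a Set.add fold over the matched indices.
theorem pvB_keys (dictionary : List (String × Int)) (ws : List String) (s : Int) (d : PySem.Dict Int Int) :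
    ((PySem.List.enumerate ws s).foldl (pvStepB dictionary) d).keys =
    ws.foldl (fun (acc : PySem.Set Int) w =>
      match PySem.Dict.get? (PySem.Dict.mk dictionary) w with
      | some v => PySem.Set.add acc v
      | none => acc) d.keys := by
  induction ws generalizing s d with
  | nil => simp [PySem.List.enumerate]
  | cons w ws ih =>
    rw [PySem.List.enumerate_cons, List.foldl_cons, List.foldl_cons, ih]
    congr 1
    unfold pvStepB
    cases PySem.Dict.get? (PySem.Dict.mk dictionary) w with
    | none => rfl
    | some idx =>
      dsimp only
      by_cases hc : (d.contains idx) = true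
      · rw [PySem.Dict.setdefault_of_contains d _ hc]
        unfold PySem.Set.add
        rw [if_pos (by simpa [PySem.Dict.contains_eq_decide_mem_keys, PySem.Set.contains] using hc)]
      · rw [PySem.Dict.setdefault_of_not_contains d _ (by simpa using hc),
            PySem.Dict.keys_insert_of_not_contains d _ (by simpa using hc)]
        unfold PySem.Set.add
        rw [if_neg (by simpa [PySem.Dict.contains_eq_decide_mem_keys, PySem.Set.contains] using hc)]

-- A's inner loop appends its per-word contribution, so its accumulator factors out.
theorem pvA_raw_factor (d : List (String × Int)) (words : List String) (acc : List Int) :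
    words.foldl (fun acc word =>
        match PySem.Dict.get? (PySem.Dict.mk d) word with
        | some v => acc ++ [v]
        | none => acc) acc
    = acc ++ words.foldl (fun acc word =>
        match PySem.Dict.get? (PySem.Dict.mk d) word with
        | some v => acc ++ [v]
        | none => acc) [] := by
  induction words generalizing acc with
  | nil => simp
  | cons w ws ih =>
    simp only [List.foldl_cons]
    cases PySem.Dict.get? (PySem.Dict.mk d) w with
    | none => exact ih acc
    | some v =>
      rw [ih (acc ++ [v])]
      conv_rhs => rw [ih]
      simp

-- Deduplicating A's raw list equals folding a per-word Set.add step over the words.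
theorem pvA_dedup_fold (d : List (String × Int)) (words : List String) (s : PySem.Set Int) :
    (words.foldl (fun acc word =>
        match PySem.Dict.get? (PySem.Dict.mk d) word with
        | some v => acc ++ [v]
        | none => acc) []).foldl PySem.Set.add s
    = words.foldl (fun s word =>
        match PySem.Dict.get? (PySem.Dict.mk d) word with
        | some v => PySem.Set.add s v
        | none => s) s := by
  induction words generalizing s with
  | nil => rfl
  | cons w ws ih =>
    simp only [List.foldl_cons]
    rw [pvA_raw_factor]
    cases PySem.Dict.get? (PySem.Dict.mk d) w with
    | none => simpa using ih s
    | some v =>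
      rw [List.foldl_append]
      simpa using ih (PySem.Set.add s v)

-- A's and B's per-line results coincide.
theorem pvLine_eq (dictionary : List (String × Int)) (ws : List String) :
    PySem.List.dedup (ws.foldl (fun acc word =>
        match PySem.Dict.get? (PySem.Dict.mk dictionary) word with
        | some v => acc ++ [v]
        | none => acc) [])
    = (PySem.List.sorted
        ((PySem.List.enumerate ws 0).foldl (pvStepB dictionary) PySem.Dict.empty).items
        (fun kv => kv.2) false).map (·.1) := by
  have hpw := pvB_items_pairwise dictionary ws 0 PySem.Dict.empty (by simp [PySem.Dict.empty]) (by simp [PySem.Dict.empty])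
  rw [PySem.List.sorted_eq_of_perm_of_pairwise_lt _ _ _ (List.Perm.refl _) hpw.1]
  have hk := pvB_keys dictionary ws 0 PySem.Dict.empty
  have hkeys : ((PySem.List.enumerate ws 0).foldl (pvStepB dictionary) PySem.Dict.empty).items.map (·.1)
      = ((PySem.List.enumerate ws 0).foldl (pvStepB dictionary) PySem.Dict.empty).keys := rfl
  rw [hkeys, hk]
  rw [PySem.List.dedup_eq_ofList, PySem.Set.ofList_eq_foldl, pvA_dedup_fold]
  rfl

-- ===== VERDICT (by name: the statement is the Claim_ definition above) =====
theorem model1_spec : Claim_equal_model1 := by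
  intro dictionary data hdom
  clear hdom
  unfold Spec_model1 model1 model1_alt
  induction data using List.reverseRecOn with
  | nil => rfl
  | append_singleton rest line ih =>
    simp only [List.foldl_append, List.foldl_cons, List.foldl_nil]
    rw [ih]
    congr 2
    exact pvLine_eq dictionary line.2
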